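-- pv_equiv track=rewrite | github.com/xerox1101/OpenFile | open_file.py | commonprefix_nocase
-- ===== SOURCE A (Python) =====
-- def commonprefix_nocase(args):
--     if len(args) == 0:
--         return ""
--
--     shortest_arg = min([len(arg) for arg in args])
--     prefix = ""
--
--     for i in range(shortest_arg):
--         fail = False
--         char = args[0][i]
--         for arg in args[1:]:
--             if arg[i].lower() != char.lower():
--                 fail = True
--                 break
--         if fail:
--             break
--         prefix += char
--
--     return prefix
-- ===== SOURCE B (Python) =====
-- def commonprefix_nocase(args):
--     if len(args) == 0:
--         return ""
--     lowered = [a.lower() for a in args]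
--     n = 0
--     for col in zip(*lowered):
--         if all(c == col[0] for c in col):
--             n += 1
--         else:
--             break
--     return args[0][:n]
-- ===== Notes on version B (the rewrite author's own statement) =====
-- stated objective: simpler
-- what changed: Replaces the index-based accumulate-and-compare double loop with: lowercase every string once, count the equal columns of zip(*lowered) in one pass, and slice that prefix off args[0].
import Mathlib
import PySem

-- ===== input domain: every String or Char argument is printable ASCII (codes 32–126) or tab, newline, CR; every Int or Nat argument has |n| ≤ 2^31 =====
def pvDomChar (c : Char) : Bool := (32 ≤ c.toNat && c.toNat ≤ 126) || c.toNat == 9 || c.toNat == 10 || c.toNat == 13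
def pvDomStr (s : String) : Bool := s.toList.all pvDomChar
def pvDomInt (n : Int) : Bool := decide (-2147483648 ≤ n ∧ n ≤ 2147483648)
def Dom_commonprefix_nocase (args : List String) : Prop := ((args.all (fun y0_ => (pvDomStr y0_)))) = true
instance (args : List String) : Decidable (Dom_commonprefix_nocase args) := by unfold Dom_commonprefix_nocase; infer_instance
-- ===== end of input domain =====

-- B lowercases every string once, counts equal columns in one pass, and slices that prefix off args[0]
-- (objective: simpler decomposition; same asymptotic cost).


-- ===== PORT A =====
-- inner loop: `for arg in args[1:]: if arg[i].lower() != char.lower(): fail = True; break`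
def pvA_inner (i : Int) (char : Char) : List String → Bool
  | [] => false
  | arg :: t =>
    match PySem.Str.pyGet? arg i with
    | none => false   -- unreachable under the outer guard (i < min length): IndexError cannot occur
    | some c =>
      if PySem.Chars.lowerChar c ≠ PySem.Chars.lowerChar char then true
      else pvA_inner i char t

-- outer loop: `for i in range(shortest): … prefix += char`, early exit on fail
def pvA_loop (args : List String) : List Int → String → String
  | [], pre => pre
  | i :: rest, pre =>
    match PySem.Str.pyGet? (PySem.List.pyGetD args 0 "") i with
    | none => pre     -- unreachable: i < shortest ≤ len(args[0])
    | some char =>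
      if pvA_inner i char (PySem.List.slice args (some 1) none) then pre
      else pvA_loop args rest (pre.push char)

def commonprefix_nocase (args : List String) : String :=
  if args.length = 0 then ""
  else
    match PySem.List.min? (args.map (fun arg => (arg.length : Int))) (fun y => y) with
    | none => ""      -- unreachable: args ≠ []
    | some shortest => pvA_loop args (PySem.List.pyRange 0 shortest 1) ""

-- ===== PORT B =====
-- `for col in zip(*lowered): if all(c == col[0] for c in col): n += 1 else: break`
-- transcribed column-wise: first row supplies col[0], the others are checked against it
def pvB_len : List Char → List (List Char) → Nat
  | [], _ => 0
  | c :: cr, rs =>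
    if rs.all (fun s => s.head? == some c)
    then 1 + pvB_len cr (rs.map (fun s => s.drop 1))
    else 0

def commonprefix_nocase_alt (args : List String) : String :=
  if args.length = 0 then ""
  else
    let lowered := args.map PySem.Str.lower
    let n := pvB_len ((lowered.headD "").toList) ((lowered.drop 1).map String.toList)
    PySem.Str.slice (PySem.List.pyGetD args 0 "") none (some (n : Int))

-- ===== PRECONDITION & SPEC =====
def Spec_commonprefix_nocase (args : List String) (out : String) : Prop := out = commonprefix_nocase_alt args
instance (args : List String) (out : String) : Decidable (Spec_commonprefix_nocase args out) := by unfold Spec_commonprefix_nocase; infer_instance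

-- ===== CLAIM (what is proved, stated in full; the proofs are below) =====
def Claim_equal_commonprefix_nocase : Prop := ∀ (args : List String), Dom_commonprefix_nocase args → Spec_commonprefix_nocase args (commonprefix_nocase args)

-- ===== LEMMAS AND PROOFS =====

-- A's inner loop is (the negation of) B's column-equality check, read at index j
theorem pvA_inner_eq (j : Nat) (char : Char) (rest : List String)
    (h : ∀ r ∈ rest, j < r.toList.length) :
    pvA_inner (j : Int) char rest
      = ! rest.all (fun r => ((PySem.Chars.lower r.toList).drop j).head? == some (PySem.Chars.lowerChar char)) := by
  induction rest with
  | nil => simp [pvA_inner]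
  | cons r t ih =>
    have hj : j < r.toList.length := h r (by simp)
    have hg : PySem.Str.pyGet? r (j : Int) = some r.toList[j] := by
      simp [List.getElem?_eq_getElem hj]
    have hh : ((PySem.Chars.lower r.toList).drop j).head?
        = some (PySem.Chars.lowerChar r.toList[j]) := by
      simp [PySem.Chars.lower, ← List.map_drop, List.head?_map,
        List.head?_drop, List.getElem?_eq_getElem hj]
    rw [pvA_inner, hg]
    show (if PySem.Chars.lowerChar r.toList[j] ≠ PySem.Chars.lowerChar char then true
      else pvA_inner (j : Int) char t) = _
    have ih' := ih (fun r hr => h r (List.mem_cons_of_mem _ hr))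
    by_cases hc : PySem.Chars.lowerChar r.toList[j] = PySem.Chars.lowerChar char
    · rw [if_neg (by simp [hc]), ih', List.all_cons, hh]
      simp [hc]
    · rw [if_pos hc, List.all_cons, hh]
      simp [hc]

-- main loop invariant: A's indexed loop from j onward produces exactly the next
-- pvB_len-many characters of args[0] (after the already accumulated prefix)
theorem pvA_loop_eq (a0 : String) (rest : List String) (S : Int)
    (hmin : ∀ arg ∈ a0 :: rest, S ≤ (arg.length : Int))
    (hmem : ∃ arg ∈ a0 :: rest, S = (arg.length : Int)) :
    ∀ (n j : Nat) (p : String), (j : Int) + n = S →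
      pvA_loop (a0 :: rest) (PySem.List.pyRange j S 1) p
        = String.ofList (p.toList ++ ((a0.toList.drop j).take
            (pvB_len ((PySem.Chars.lower a0.toList).drop j)
              (rest.map (fun r => (PySem.Chars.lower r.toList).drop j))))) := by
  intro n
  induction n with
  | zero =>
    intro j p hjn
    have hj : (j : Int) = S := by omega
    rw [PySem.List.pyRange_one_eq_nil (by omega)]
    -- the range is empty; show the B-side count contributes nothing
    have hz : (a0.toList.drop j).take
        (pvB_len ((PySem.Chars.lower a0.toList).drop j)
          (rest.map (fun r => (PySem.Chars.lower r.toList).drop j))) = [] := by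
      obtain ⟨arg, hargmem, harg⟩ := hmem
      rw [List.mem_cons] at hargmem
      rcases hargmem with h0 | hr
      · subst h0
        have : arg.toList.length ≤ j := by
          have := String.length_toList (s := arg); omega
        simp [List.drop_eq_nil_of_le this]
      · -- a row of rest is exhausted: the all-check fails (or the first row is empty)
        cases hfst : (PySem.Chars.lower a0.toList).drop j with
        | nil => simp [pvB_len]
        | cons c cr =>
          have hempty : (PySem.Chars.lower arg.toList).drop j = [] := by
            apply List.drop_eq_nil_of_le
            simp [PySem.Chars.lower]
            have := String.length_toList (s := arg); omega
          have hallfalse : (rest.map (fun r => (PySem.Chars.lower r.toList).drop j)).all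
              (fun s => s.head? == some c) = false := by
            rw [List.all_eq_false]
            exact ⟨(PySem.Chars.lower arg.toList).drop j,
              List.mem_map.mpr ⟨arg, hr, rfl⟩, by simp [hempty]⟩
          simp [pvB_len, hallfalse]
    simp [pvA_loop, hz]
  | succ n ih =>
    intro j p hjn
    have hjS : (j : Int) < S := by omega
    have hja0 : j < a0.toList.length := by
      have := hmin a0 (by simp)
      have := String.length_toList (s := a0); omega
    rw [PySem.List.pyRange_one_cons hjS]
    have hget : PySem.Str.pyGet? (PySem.List.pyGetD (a0 :: rest) 0 "") (j : Int)
        = some a0.toList[j] := by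
      simp [PySem.List.pyGetD_zero_cons, List.getElem?_eq_getElem hja0]
    have hrestlen : ∀ r ∈ rest, j < r.toList.length := by
      intro r hr
      have := hmin r (by simp [hr])
      have := String.length_toList (s := r); omega
    have hinner := pvA_inner_eq j a0.toList[j] rest hrestlen
    have hdropj : (PySem.Chars.lower a0.toList).drop j
        = PySem.Chars.lowerChar a0.toList[j] :: (PySem.Chars.lower a0.toList).drop (j+1) := by
      have hj' : j < (PySem.Chars.lower a0.toList).length := by
        simpa [PySem.Chars.lower] using hja0
      rw [List.drop_eq_getElem_cons hj']
      simp [PySem.Chars.lower]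
    rw [pvA_loop, hget, PySem.List.slice_from_one, List.tail_cons]
    show (if pvA_inner (j : Int) a0.toList[j] rest = true then p
      else pvA_loop (a0 :: rest) (PySem.List.pyRange ((j : Int) + 1) S) (p.push a0.toList[j])) = _
    rw [hinner]
    have hmapall : (List.map (fun r => (PySem.Chars.lower r.toList).drop j) rest).all
        (fun s => s.head? == some (PySem.Chars.lowerChar a0.toList[j]))
        = rest.all (fun r => ((PySem.Chars.lower r.toList).drop j).head?
            == some (PySem.Chars.lowerChar a0.toList[j])) := by
      simp only [List.all_map, Function.comp_def]
    by_cases hall : rest.all (fun r => ((PySem.Chars.lower r.toList).drop j).head?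
        == some (PySem.Chars.lowerChar a0.toList[j])) = true
    · -- column agrees: both sides consume one character
      rw [hall]
      simp only [Bool.not_true]
      rw [if_neg (by simp)]
      have hrec := ih (j+1) (p.push a0.toList[j]) (by push_cast at hjn ⊢; omega)
      rw [show ((j : Int) + 1) = ((j + 1 : Nat) : Int) by push_cast; ring, hrec]
      rw [hdropj, pvB_len, if_pos (by rw [hmapall]; exact hall)]
      have hdrops : (rest.map (fun r => (PySem.Chars.lower r.toList).drop j)).map
          (fun s => s.drop 1) = rest.map (fun r => (PySem.Chars.lower r.toList).drop (j+1)) := by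
        simp [Function.comp_def]
      rw [hdrops]
      refine congrArg String.ofList ?_
      rw [List.drop_eq_getElem_cons hja0, Nat.add_comm 1, List.take_succ_cons,
        String.toList_push, List.append_assoc, List.singleton_append]
    · -- mismatch in this column: A breaks, B counts zero
      have hallf : rest.all (fun r => ((PySem.Chars.lower r.toList).drop j).head?
          == some (PySem.Chars.lowerChar a0.toList[j])) = false := Bool.eq_false_iff.mpr hall
      rw [hallf]
      simp only [Bool.not_false]
      rw [if_pos trivial, hdropj, pvB_len, if_neg (by rw [hmapall, hallf]; simp)]
      simp

theorem commonprefix_nocase_eq_alt (args : List String) :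
    commonprefix_nocase args = commonprefix_nocase_alt args := by
  cases args with
  | nil => simp [commonprefix_nocase, commonprefix_nocase_alt]
  | cons a0 rest =>
    have hlen : (a0 :: rest).length ≠ 0 := by simp
    have hmin : PySem.List.min? ((a0 :: rest).map (fun arg => (arg.length : Int))) (fun y => y)
        = some ((rest.map (fun arg => (arg.length : Int))).foldl min (a0.length : Int)) := by
      simp [PySem.List.min?_id_cons]
    set S := (rest.map (fun arg => (arg.length : Int))).foldl min (a0.length : Int) with hS
    have hisMin := PySem.List.min?_isMin hmin
    have hmem' := PySem.List.min?_mem hmin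
    have hminle : ∀ arg ∈ a0 :: rest, S ≤ (arg.length : Int) := by
      intro arg harg
      exact hisMin (arg.length : Int) (List.mem_map.mpr ⟨arg, harg, rfl⟩)
    have hmem : ∃ arg ∈ a0 :: rest, S = (arg.length : Int) := by
      obtain ⟨arg, harg, heq⟩ := List.mem_map.mp hmem'
      exact ⟨arg, harg, heq.symm⟩
    have hS0 : 0 ≤ S := by
      obtain ⟨arg, _, heq⟩ := hmem; omega
    have hloop := pvA_loop_eq a0 rest S hminle hmem S.toNat 0 ""
      (by push_cast; omega)
    rw [commonprefix_nocase, if_neg hlen, hmin]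
    push_cast at hloop
    show pvA_loop (a0 :: rest) (PySem.List.pyRange 0 S) "" = _
    rw [hloop]
    rw [commonprefix_nocase_alt, if_neg hlen]
    simp only [List.map_cons, List.headD_cons, List.drop_succ_cons, List.drop_zero,
      List.map_map]
    apply String.toList_inj.mp
    simp [PySem.Str.toList_slice, PySem.Chars.slice_eq_listSlice, PySem.List.slice_to_natCast,
      PySem.Str.toList_lower, Function.comp_def]

-- ===== VERDICT (by name: the statement is the Claim_ definition above) =====
theorem commonprefix_nocase_spec : Claim_equal_commonprefix_nocase := by
  intro args _
  unfold Spec_commonprefix_nocase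
  exact commonprefix_nocase_eq_alt args
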